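-- pv_equiv track=rewrite | github.com/goldenfay/pfe-documentations | CC App/Developpement/components/Global_Charts.py | get_min_hour
-- ===== SOURCE A (Python) =====
-- def get_min_hour(data):
--     min_crowd = min(data['crowd_data']['crowd_number'])
--     hours = []
--     i = 0
--     for hour in data['crowd_data']['time']:
--         if min_crowd == data['crowd_data']['crowd_number'][i]:
--             hours.append(hour)
--         i = i + 1
--     return hours
-- ===== SOURCE B (Python) =====
-- def get_min_hour(data):
--     crowd = data['crowd_data']['crowd_number']
--     min_crowd = min(crowd)
--     groups = {}
--     for i, hour in enumerate(data['crowd_data']['time']):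
--         groups.setdefault(crowd[i], []).append(hour)
--     return groups.get(min_crowd, [])
-- ===== Notes on version B (the rewrite author's own statement) =====
-- stated objective: alternative
-- what changed: A computes the min and then re-scans time filtering against crowd_number[i] with a hand-kept counter; B makes one group-by pass bucketing hours in a dict keyed by their crowd number and returns the minimum's bucket (default []).
import Mathlib
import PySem

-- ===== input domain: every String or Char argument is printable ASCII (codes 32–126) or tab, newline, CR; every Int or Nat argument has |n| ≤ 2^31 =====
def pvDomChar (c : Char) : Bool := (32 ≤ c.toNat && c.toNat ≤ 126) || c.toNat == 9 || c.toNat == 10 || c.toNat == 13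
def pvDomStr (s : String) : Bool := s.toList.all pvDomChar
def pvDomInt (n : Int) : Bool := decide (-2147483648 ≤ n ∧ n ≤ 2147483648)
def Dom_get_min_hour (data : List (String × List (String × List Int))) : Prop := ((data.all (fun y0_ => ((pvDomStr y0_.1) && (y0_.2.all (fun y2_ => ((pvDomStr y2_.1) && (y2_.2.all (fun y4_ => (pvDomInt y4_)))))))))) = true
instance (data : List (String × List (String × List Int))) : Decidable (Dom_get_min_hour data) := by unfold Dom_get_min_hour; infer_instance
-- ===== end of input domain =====

-- B replaces A's "compute min, then re-scan time filtering against crowd_number[i] with a counter"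
-- by a single group-by pass (a dict bucketing hours under their crowd number) and one lookup of the
-- minimum's bucket; equal cost, different shape (objective: alternative).

-- ===== PORT A =====
-- dict[str, ...] arguments arrive as association lists (first match wins): d[k] is this lookup
def lookupStr {α : Type} (d : List (String × α)) (k : String) : Option α :=
  (d.find? (fun p => p.1 == k)).map (·.2)

-- A raises (KeyError/ValueError/IndexError) outside Pre_; the none-branches below are unreachable under Pre_.
def get_min_hour (data : List (String × List (String × List Int))) : List Int :=
  match lookupStr data "crowd_data" with
  | none => []
  | some cd =>
    match lookupStr cd "crowd_number" with
    | none => []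
    | some cn =>
      match PySem.List.min? cn (fun x => x) with
      | none => []
      | some min_crowd =>
        match lookupStr cd "time" with
        | none => []
        | some time =>
          -- hours = []; i = 0; for hour in time: if min_crowd == cn[i]: hours.append(hour); i += 1
          (time.foldl (fun (st : List Int × Int) hour =>
              match PySem.List.pyGet? cn st.2 with
              | none => st
              | some c => (if min_crowd = c then st.1 ++ [hour] else st.1, st.2 + 1))
            ([], 0)).1

-- ===== PORT B =====
-- B's own first-match association lookup, written structurally
def pyKey {α : Type} : List (String × α) → String → Option α
  | [], _ => none
  | (k, v) :: rest, key => if k == key then some v else pyKey rest key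

-- groups = {}; for i, hour in enumerate(time): groups.setdefault(crowd[i], []).append(hour)
def buildGroups (crowd : List Int) (time : List Int) : PySem.Dict Int (List Int) :=
  (PySem.List.enumerate time).foldl
    (fun g p =>
      match PySem.List.pyGet? crowd p.1 with
      | none => g  -- crowd[i] raises IndexError here; unreachable under Pre_
      | some c => PySem.Dict.modify g c [] (fun l => l ++ [p.2]))
    PySem.Dict.empty

def get_min_hour_alt (data : List (String × List (String × List Int))) : List Int :=
  ((pyKey data "crowd_data").bind fun cd =>
   (pyKey cd "crowd_number").bind fun crowd =>
   (PySem.List.min? crowd (fun x => x)).bind fun min_crowd =>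
   (pyKey cd "time").map fun time =>
     PySem.Dict.getD (buildGroups crowd time) min_crowd []).getD []

-- ===== PRECONDITION & SPEC =====
-- Pre_ excludes exactly the inputs where A raises: a missing 'crowd_data'/'crowd_number'/'time'
-- key (KeyError), an empty crowd_number list (ValueError from min), or time longer than
-- crowd_number (IndexError); B raises the same exceptions there.
def preCheck (data : List (String × List (String × List Int))) : Bool :=
  match lookupStr data "crowd_data" with
  | none => false
  | some cd =>
    match lookupStr cd "crowd_number", lookupStr cd "time" with
    | some cn, some t => !(List.isEmpty cn) && decide (List.length t ≤ List.length cn)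
    | _, _ => false

def Pre_get_min_hour (data : List (String × List (String × List Int))) : Prop :=
  preCheck data = true
instance (data : List (String × List (String × List Int))) : Decidable (Pre_get_min_hour data) := by
  unfold Pre_get_min_hour; infer_instance

def pvWitness_get_min_hour : (List (String × List (String × List Int))) :=
  [("crowd_data", [("crowd_number", [3, 1, 2, 1]), ("time", [8, 9, 10, 11])])]

def Spec_get_min_hour (data : List (String × List (String × List Int))) (out : List Int) : Prop := out = get_min_hour_alt data
instance (data : List (String × List (String × List Int))) (out : List Int) : Decidable (Spec_get_min_hour data out) := by unfold Spec_get_min_hour; infer_instance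

-- ===== CLAIM (what is proved, stated in full; the proofs are below) =====
def Claim_equal_get_min_hour : Prop := ∀ (data : List (String × List (String × List Int))), Dom_get_min_hour data → Pre_get_min_hour data → Spec_get_min_hour data (get_min_hour data)

-- ===== LEMMAS AND PROOFS =====

theorem pyKey_eq_lookupStr {α : Type} (d : List (String × α)) (k : String) :
    pyKey d k = lookupStr d k := by
  induction d with
  | nil => simp [pyKey, lookupStr]
  | cons p rest ih =>
    obtain ⟨pk, pv⟩ := p
    by_cases h : pk == k <;> simp [pyKey, lookupStr, h] at ih ⊢; exact ih

-- the hours selected from `time` starting at index j, A's way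
def selA (cn : List Int) (minc : Int) : Int → List Int → List Int
  | _, [] => []
  | j, h :: rest =>
    match PySem.List.pyGet? cn j with
    | none => selA cn minc j rest
    | some c => (if minc = c then [h] else []) ++ selA cn minc (j + 1) rest

theorem foldA_eq_selA (cn : List Int) (minc : Int) (t : List Int) :
    ∀ (acc : List Int) (j : Int),
      (t.foldl (fun (st : List Int × Int) hour =>
          match PySem.List.pyGet? cn st.2 with
          | none => st
          | some c => (if minc = c then st.1 ++ [hour] else st.1, st.2 + 1))
        (acc, j)).1 = acc ++ selA cn minc j t := by
  induction t with
  | nil => intro acc j; simp [selA]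
  | cons h rest ih =>
    intro acc j
    simp only [List.foldl_cons, selA]
    cases hg : PySem.List.pyGet? cn j with
    | none => exact ih acc j
    | some c =>
      by_cases hc : minc = c
      · subst hc; simp [ih, List.append_assoc]
      · simp [hc, ih]

-- the hours selected from an enumerated list, B's way
def selB (cn : List Int) (minc : Int) : List (Int × Int) → List Int
  | [] => []
  | p :: rest =>
    (match PySem.List.pyGet? cn p.1 with
     | none => []
     | some c => if minc = c then [p.2] else []) ++ selB cn minc rest

theorem foldB_eq_selB (cn : List Int) (minc : Int) (ps : List (Int × Int)) :
    ∀ (g : PySem.Dict Int (List Int)),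
      PySem.Dict.getD (ps.foldl (fun (g : PySem.Dict Int (List Int)) p =>
          match PySem.List.pyGet? cn p.1 with
          | none => g
          | some c => PySem.Dict.modify g c [] (fun l => l ++ [p.2])) g) minc []
        = PySem.Dict.getD g minc [] ++ selB cn minc ps := by
  induction ps with
  | nil => intro g; simp [selB]
  | cons p rest ih =>
    intro g
    simp only [List.foldl_cons, selB]
    cases hg : PySem.List.pyGet? cn p.1 with
    | none => simp [ih]
    | some c =>
      rw [ih, PySem.Dict.getD_modify]
      by_cases hc : minc = c <;> simp [hc, List.append_assoc]

theorem selA_eq_selB (cn : List Int) (minc : Int) (t : List Int) :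
    ∀ (j : Nat), j + t.length ≤ cn.length →
      selA cn minc (j : Int) t = selB cn minc (PySem.List.enumerate t (j : Int)) := by
  induction t with
  | nil => intro j _; simp [selA, PySem.List.enumerate_nil, selB]
  | cons h rest ih =>
    intro j hj
    have hlt : j < cn.length := by simp at hj; omega
    have hg : PySem.List.pyGet? cn (j : Int) = some cn[j] := PySem.List.pyGet?_ofNat cn j hlt
    rw [PySem.List.enumerate_cons]
    simp only [selA, selB, hg]
    have hcast : ((j : Int) + 1) = ((j + 1 : Nat) : Int) := by push_cast; ring
    rw [hcast, ih (j + 1) (by simp at hj ⊢; omega)]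

-- ===== VERDICT (by name: the statement is the Claim_ definition above) =====
theorem get_min_hour_spec : Claim_equal_get_min_hour := by
  intro data _ hpre
  unfold Spec_get_min_hour get_min_hour get_min_hour_alt buildGroups
  unfold Pre_get_min_hour preCheck at hpre
  rw [pyKey_eq_lookupStr]
  cases h1 : lookupStr data "crowd_data" with
  | none => simp only [h1] at hpre; exact absurd hpre (by decide)
  | some cd =>
    simp only [h1, Option.bind_some] at hpre ⊢
    rw [pyKey_eq_lookupStr]
    cases h2 : lookupStr cd "crowd_number" with
    | none => simp only [h2] at hpre; exact absurd hpre (by decide)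
    | some cn =>
      cases h3 : lookupStr cd "time" with
      | none => simp only [h2, h3] at hpre; exact absurd hpre (by decide)
      | some t =>
        simp only [h2, h3, Bool.and_eq_true, Bool.not_eq_true', List.isEmpty_eq_false_iff,
          decide_eq_true_eq, Option.bind_some] at hpre ⊢
        obtain ⟨hne, hlen⟩ := hpre
        cases hm : PySem.List.min? cn (fun x => x) with
        | none => exact absurd ((PySem.List.min?_eq_none_iff _ _).mp hm) hne
        | some minc =>
          rw [pyKey_eq_lookupStr, h3]
          simp only [Option.bind_some, Option.map_some, Option.getD_some]
          rw [foldA_eq_selA, foldB_eq_selB]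
          have := selA_eq_selB cn minc t 0 (by simpa using hlen)
          simpa using this
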